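-- pv_equiv track=rewrite | github.com/oguzhan1998eroglu/a_star | a_star.py | up_is_valid
-- ===== SOURCE A (Python) =====
-- def is_valid(index, row_size, column_size):
--     return (index[0] >= 0 and index[1] >= 0) and (index[0] < row_size and index[1] < column_size)
--
-- def up_is_valid(map, boundary, row_size, column_size):
--     starting_point = boundary[0]
--     finishing_point = boundary[1]
--     up_is_v = True
--     size = abs(starting_point[1] - finishing_point[1]) + 1
--     for i in range(size):
--         if not is_valid([starting_point[0]-1, starting_point[1]+i], row_size, column_size):
--             up_is_v = False
--     up_is_zero = True
--     if up_is_v: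
--         for i in range(size):
--             if map[boundary[0][0]-1][boundary[0][1]+i] != 0:
--                 up_is_zero = False
--     return up_is_zero and up_is_v
-- ===== SOURCE B (Python) =====
-- def up_is_valid(map, boundary, row_size, column_size):
--     r = boundary[0][0] - 1
--     c0 = boundary[0][1]
--     size = abs(c0 - boundary[1][1]) + 1
--     if not (0 <= r < row_size and 0 <= c0 and c0 + size - 1 < column_size):
--         return False
--     row = map[r]
--     return all(row[c0 + i] == 0 for i in range(size))
-- ===== Notes on version B (the rewrite author's own statement) =====
-- stated objective: simpler
-- what changed: The per-cell validity loop is replaced by a single closed-form interval bounds check, and the zero scan becomes one all() over the row fetched once.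
import Mathlib
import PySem

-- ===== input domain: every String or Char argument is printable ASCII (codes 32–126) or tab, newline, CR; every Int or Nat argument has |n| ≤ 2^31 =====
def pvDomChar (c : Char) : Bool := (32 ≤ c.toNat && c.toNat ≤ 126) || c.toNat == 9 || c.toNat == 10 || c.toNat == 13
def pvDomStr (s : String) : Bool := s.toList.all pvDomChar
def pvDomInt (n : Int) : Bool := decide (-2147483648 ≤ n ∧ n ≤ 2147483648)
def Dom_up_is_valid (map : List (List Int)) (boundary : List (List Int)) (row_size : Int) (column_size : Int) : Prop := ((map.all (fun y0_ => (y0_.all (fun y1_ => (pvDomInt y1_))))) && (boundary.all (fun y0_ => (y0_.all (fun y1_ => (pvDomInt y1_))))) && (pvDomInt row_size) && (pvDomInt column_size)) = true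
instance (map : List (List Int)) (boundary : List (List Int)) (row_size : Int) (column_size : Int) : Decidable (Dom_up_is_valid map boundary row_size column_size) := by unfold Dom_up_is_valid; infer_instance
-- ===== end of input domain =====

-- B replaces A's per-cell validity loop by a closed-form interval bounds check and the
-- zero scan by one all() over the row fetched once (objective: simpler).

-- ===== PORT A =====
-- Python's is_valid takes the 2-element literal list [i0, i1]; it is passed here as its
-- two components (the list is always built with exactly these two entries at the call site).
def is_valid (i0 i1 row_size column_size : Int) : Bool :=
  (decide (i0 ≥ 0) && decide (i1 ≥ 0)) && (decide (i0 < row_size) && decide (i1 < column_size))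

-- literal port of A; where Python raises IndexError (short boundary / map access out of
-- range) the port returns false — those inputs are excluded by Pre_up_is_valid.
def up_is_valid (map : List (List Int)) (boundary : List (List Int)) (row_size : Int) (column_size : Int) : Bool :=
  match PySem.List.pyGet? boundary 0, PySem.List.pyGet? boundary 1 with
  | some starting_point, some finishing_point =>
    match PySem.List.pyGet? starting_point 0, PySem.List.pyGet? starting_point 1,
          PySem.List.pyGet? finishing_point 1 with
    | some sp0, some sp1, some fp1 =>
      let size : Nat := (sp1 - fp1).natAbs + 1
      let up_is_v := (List.range size).foldl
        (fun (v : Bool) (i : Nat) => if !(is_valid (sp0 - 1) (sp1 + (i : Int)) row_size column_size) then false else v) true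
      let up_is_zero :=
        if up_is_v then
          (List.range size).foldl
            (fun (z : Bool) (i : Nat) =>
              match (PySem.List.pyGet? map (sp0 - 1)).bind
                    (fun row => PySem.List.pyGet? row (sp1 + (i : Int))) with
              | some v => if v ≠ 0 then false else z
              | none => false) true
        else true
      up_is_zero && up_is_v
    | _, _, _ => false
  | _, _ => false

-- ===== PORT B =====
def up_is_valid_alt (map : List (List Int)) (boundary : List (List Int)) (row_size : Int) (column_size : Int) : Bool :=
  (((PySem.List.pyGet? boundary 0).bind fun b0 =>
    (PySem.List.pyGet? boundary 1).bind fun b1 =>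
    (PySem.List.pyGet? b0 0).bind fun b00 =>
    (PySem.List.pyGet? b0 1).bind fun c0 =>
    (PySem.List.pyGet? b1 1).map fun e1 =>
      let r := b00 - 1
      let size : Nat := (c0 - e1).natAbs + 1
      if !(decide (0 ≤ r) && decide (r < row_size) && decide (0 ≤ c0) &&
           decide (c0 + (size : Int) - 1 < column_size)) then false
      else
        (PySem.List.pyGet? map r).elim false
          (fun row => (List.range size).all (fun (i : Nat) => PySem.List.pyGet? row (c0 + (i : Int)) == some 0))
   ).getD false)

-- ===== PRECONDITION & SPEC =====
-- Pre_ excludes exactly the inputs where Python A raises IndexError: boundary (or its first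
-- two rows) too short, or — when the checked cells are all valid — the map smaller than the
-- accessed row/column range.
def Pre_up_is_valid (map : List (List Int)) (boundary : List (List Int)) (row_size : Int) (column_size : Int) : Prop :=
  2 ≤ boundary.length ∧ 2 ≤ (boundary.getD 0 []).length ∧ 2 ≤ (boundary.getD 1 []).length ∧
  (let sp0 := (boundary.getD 0 []).getD 0 0
   let sp1 := (boundary.getD 0 []).getD 1 0
   let fp1 := (boundary.getD 1 []).getD 1 0
   let size : Nat := (sp1 - fp1).natAbs + 1
   (0 ≤ sp0 - 1 ∧ sp0 - 1 < row_size ∧ 0 ≤ sp1 ∧ sp1 + (size : Int) - 1 < column_size) →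
     (sp0 - 1 < (map.length : Int) ∧
      sp1 + (size : Int) - 1 < ((map.getD (sp0 - 1).toNat []).length : Int)))
instance (map : List (List Int)) (boundary : List (List Int)) (row_size : Int) (column_size : Int) : Decidable (Pre_up_is_valid map boundary row_size column_size) := by unfold Pre_up_is_valid; infer_instance

def pvWitness_up_is_valid : List (List Int) × List (List Int) × Int × Int :=
  ([[0, 0, 0], [1, 1, 1]], [[1, 0], [1, 2]], 2, 3)

def Spec_up_is_valid (map : List (List Int)) (boundary : List (List Int)) (row_size : Int) (column_size : Int) (out : Bool) : Prop := out = up_is_valid_alt map boundary row_size column_size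
instance (map : List (List Int)) (boundary : List (List Int)) (row_size : Int) (column_size : Int) (out : Bool) : Decidable (Spec_up_is_valid map boundary row_size column_size out) := by unfold Spec_up_is_valid; infer_instance

-- ===== CLAIM (what is proved, stated in full; the proofs are below) =====
def Claim_equal_up_is_valid : Prop := ∀ (map : List (List Int)) (boundary : List (List Int)) (row_size : Int) (column_size : Int), Dom_up_is_valid map boundary row_size column_size → Pre_up_is_valid map boundary row_size column_size → Spec_up_is_valid map boundary row_size column_size (up_is_valid map boundary row_size column_size)

-- ===== LEMMAS AND PROOFS =====

-- A foldl that latches false once a bad element is seen computes `b && all good`.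
theorem foldl_latch {α : Type} (p : α → Bool) (l : List α) (b : Bool) :
    l.foldl (fun v x => if !(p x) then false else v) b = (b && l.all p) := by
  induction l generalizing b with
  | nil => simp
  | cons x xs ih =>
    simp only [List.foldl_cons, List.all_cons, ih]
    cases hpx : p x <;> cases b <;> simp

-- A's second loop has the same latching shape (via the per-cell double read).
theorem foldl_latch_opt (map : List (List Int)) (r c : Int) (l : List Nat) (b : Bool) :
    l.foldl (fun (z : Bool) (i : Nat) =>
        match (PySem.List.pyGet? map r).bind (fun row => PySem.List.pyGet? row (c + (i : Int))) with
        | some v => if v ≠ 0 then false else z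
        | none => false) b
      = (b && l.all (fun (i : Nat) =>
          ((PySem.List.pyGet? map r).bind (fun row => PySem.List.pyGet? row (c + (i : Int)))) == some 0)) := by
  induction l generalizing b with
  | nil => simp
  | cons x xs ih =>
    simp only [List.foldl_cons, List.all_cons, ih]
    cases hfx : (PySem.List.pyGet? map r).bind (fun row => PySem.List.pyGet? row (c + (x : Int))) with
    | none => cases b <;> simp
    | some v =>
      by_cases hv : v = 0 <;> cases b <;> simp [hv]

-- A's per-cell validity over range(size) equals B's closed-form interval check.
theorem all_is_valid_interval (r c0 rs cs : Int) (size : Nat) (hsize : 1 ≤ size) :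
    (List.range size).all (fun i => is_valid r (c0 + (i : Int)) rs cs)
      = (decide (0 ≤ r) && decide (r < rs) && decide (0 ≤ c0) &&
         decide (c0 + (size : Int) - 1 < cs)) := by
  rw [Bool.eq_iff_iff]
  simp only [List.all_eq_true, List.mem_range, is_valid, Bool.and_eq_true, decide_eq_true_eq]
  constructor
  · intro h
    obtain ⟨⟨h1, h2⟩, h3, h4⟩ := h (size - 1) (by omega)
    have h0 := h 0 (by omega)
    have : ((size - 1 : Nat) : Int) = (size : Int) - 1 := by omega
    refine ⟨⟨⟨h1, h3⟩, by simpa using h0.1.2⟩, by omega⟩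
  · rintro ⟨⟨⟨h1, h2⟩, h3⟩, h4⟩ i hi
    have : (i : Int) < (size : Int) := by exact_mod_cast hi
    exact ⟨⟨h1, by omega⟩, h2, by omega⟩

-- With a nonnegative row index, A's per-iteration double read equals B's read of the one row.
theorem zero_scan_eq (map : List (List Int)) (r c0 : Int) (size : Nat) (hsize : 1 ≤ size) :
    (List.range size).all
        (fun i => ((PySem.List.pyGet? map r).bind (fun row => PySem.List.pyGet? row (c0 + (i : Int)))) == some 0)
      = (PySem.List.pyGet? map r).elim false
          (fun row => (List.range size).all (fun (i : Nat) => PySem.List.pyGet? row (c0 + (i : Int)) == some 0)) := by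
  cases h : PySem.List.pyGet? map r with
  | none =>
    have : (0 : Nat) ∈ List.range size := by simp; omega
    rw [Bool.eq_iff_iff]
    simp only [List.all_eq_true]
    constructor
    · intro hall; exact absurd (hall 0 this) (by simp)
    · intro hf; simp at hf
  | some row => simp [h]

theorem up_is_valid_spec_aux : ∀ (map : List (List Int)) (boundary : List (List Int)) (row_size : Int) (column_size : Int),
    up_is_valid map boundary row_size column_size = up_is_valid_alt map boundary row_size column_size := by
  intro map boundary row_size column_size
  unfold up_is_valid up_is_valid_alt
  cases h0 : PySem.List.pyGet? boundary 0 with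
  | none => rfl
  | some sp =>
  cases h1 : PySem.List.pyGet? boundary 1 with
  | none => rfl
  | some fp =>
  cases h00 : PySem.List.pyGet? sp 0 with
  | none => simp [h00]
  | some sp0 =>
  cases h01 : PySem.List.pyGet? sp 1 with
  | none => simp [h00, h01]
  | some sp1 =>
  cases h11 : PySem.List.pyGet? fp 1 with
  | none => simp [h00, h01, h11]
  | some fp1 =>
  simp only [h00, h01, h11, Option.bind_some, Option.map_some, Option.getD_some]
  set size : Nat := (sp1 - fp1).natAbs + 1 with hsz
  have hsize : 1 ≤ size := Nat.le_add_left 1 _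
  rw [foldl_latch, Bool.true_and, all_is_valid_interval _ _ _ _ _ hsize]
  set g : Bool := (decide (0 ≤ sp0 - 1) && decide (sp0 - 1 < row_size) && decide (0 ≤ sp1) &&
      decide (sp1 + (size : Int) - 1 < column_size)) with hg
  cases hgb : g with
  | false => simp
  | true =>
    simp only [Bool.not_true, Bool.false_eq_true, if_false, if_true, Bool.and_true]
    rw [foldl_latch_opt, Bool.true_and]
    exact zero_scan_eq map (sp0 - 1) sp1 size hsize

-- ===== VERDICT (by name: the statement is the Claim_ definition above) =====
theorem up_is_valid_spec : Claim_equal_up_is_valid := by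
  intro map boundary row_size column_size _ _
  unfold Spec_up_is_valid
  exact up_is_valid_spec_aux map boundary row_size column_size
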